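-- pv_equiv track=rewrite | github.com/danitrave/DNA_project | DNA_Project/dna.py | countACG
-- ===== SOURCE A (Python) =====
-- def countACG(dna):
--
--     if dna == "":
--         return None
--
--     dna = dna.upper()
--     s = ""
--
--     for e in dna:
--         if e != "T":
--             s += e
--
--     return len(s)
--
--     """Returns the number of nucleotides that are not T in a DNA sequence
--     Parameter:
--         dna: a string object representing a DNA sequence
--     Return value: the integer number of nucleotides in dna that are not T
--     Example: countACG("atcgttcaag") = 7
--     """
-- ===== SOURCE B (Python) =====
-- def countACG(dna):
--     if dna == "":
--         return None
--     return len(dna) - dna.upper().count("T")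
-- ===== Notes on version B (the rewrite author's own statement) =====
-- stated objective: simpler
-- what changed: B computes the complement in closed form (total length minus the number of 'T's via str.count) instead of looping over the string and accumulating the kept characters into a new string and taking its length.
import Mathlib
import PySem

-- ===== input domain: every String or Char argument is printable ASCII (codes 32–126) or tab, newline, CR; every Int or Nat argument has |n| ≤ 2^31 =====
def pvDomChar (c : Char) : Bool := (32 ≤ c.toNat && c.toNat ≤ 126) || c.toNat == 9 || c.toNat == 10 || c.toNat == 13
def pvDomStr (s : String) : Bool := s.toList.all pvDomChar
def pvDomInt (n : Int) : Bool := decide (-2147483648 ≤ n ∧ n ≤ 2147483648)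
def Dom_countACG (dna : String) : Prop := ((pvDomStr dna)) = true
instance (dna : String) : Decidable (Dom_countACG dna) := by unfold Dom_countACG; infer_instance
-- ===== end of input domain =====

-- B replaces A's accumulate-into-a-string loop by the complement: len(dna) - dna.upper().count("T") (objective: simpler).

-- ===== PORT A =====
def countACG (dna : String) : Option Int :=
  if dna == "" then none
  else
    -- dna = dna.upper(); s = ""; for e in dna: if e != "T": s += e; return len(s)
    let up := PySem.Chars.upper dna.toList
    let s := up.foldl (fun s e => if e ≠ 'T' then s ++ [e] else s) ([] : List Char)
    some (s.length : Int)

-- ===== PORT B =====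
def countACG_alt (dna : String) : Option Int :=
  if dna == "" then none
  else some ((PySem.Str.len dna : Int) - (PySem.Str.count (PySem.Str.upper dna) "T" : Int))

-- ===== PRECONDITION & SPEC =====
def Spec_countACG (dna : String) (out : Option Int) : Prop := out = countACG_alt dna
instance (dna : String) (out : Option Int) : Decidable (Spec_countACG dna out) := by unfold Spec_countACG; infer_instance

-- ===== CLAIM (what is proved, stated in full; the proofs are below) =====
def Claim_equal_countACG : Prop := ∀ (dna : String), Dom_countACG dna → Spec_countACG dna (countACG dna)

-- ===== LEMMAS AND PROOFS =====

-- single-character substring count is character count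
lemma count_go_singleton (c : Char) (l : List Char) (fuel acc : Nat) (h : l.length ≤ fuel) :
    PySem.Chars.count.go [c] fuel l acc = acc + l.count c := by
  induction l generalizing fuel acc with
  | nil => cases fuel <;> simp [PySem.Chars.count.go]
  | cons x t ih =>
    cases fuel with
    | zero => simp at h
    | succ f =>
      simp only [PySem.Chars.count.go]
      by_cases hx : x = c
      · subst hx
        simp [List.isPrefixOf, List.count_cons, ih t.length acc (le_refl _),
          ih _ (acc + 1) (Nat.le_of_succ_le_succ h)]
        omega
      · have : List.isPrefixOf [c] (x :: t) = false := by
          simp [List.isPrefixOf]; exact fun hcx => absurd hcx.symm hx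
        simp [this, List.count_cons, hx, ih _ acc (Nat.le_of_succ_le_succ h)]

lemma count_singleton (c : Char) (l : List Char) :
    PySem.Chars.count l [c] = l.count c := by
  simp [PySem.Chars.count, count_go_singleton c l l.length 0 (le_refl _)]

lemma foldl_filter (l : List Char) (s : List Char) :
    l.foldl (fun s e => if e ≠ 'T' then s ++ [e] else s) s
      = s ++ l.filter (· ≠ 'T') := by
  induction l generalizing s with
  | nil => simp
  | cons x t ih =>
    rw [List.foldl_cons]
    by_cases hx : x = 'T'
    · rw [if_neg (by simp [hx]), ih, List.filter_cons]
      simp [hx]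
    · rw [if_pos (by simp [hx]), ih, List.filter_cons]
      simp [hx]

lemma filter_count_split (l : List Char) :
    (l.filter (· ≠ 'T')).length + l.count 'T' = l.length := by
  induction l with
  | nil => simp
  | cons x t ih =>
    by_cases hx : x = 'T' <;>
      simp [hx, List.count_cons, List.filter_cons] at ih ⊢ <;> omega

-- ===== VERDICT (by name: the statement is the Claim_ definition above) =====
theorem countACG_spec : Claim_equal_countACG := by
  intro dna _
  unfold Spec_countACG countACG countACG_alt
  by_cases h : dna = ""
  · simp [h]
  · have hne : (dna == "") = false := by simp [h]
    simp only [hne, Bool.false_eq_true, if_false]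
    set up := PySem.Chars.upper dna.toList with hup
    have hlen : up.length = dna.toList.length := by
      simp [hup, PySem.Chars.upper]
    have hcount : PySem.Str.count (PySem.Str.upper dna) "T" = up.count 'T' := by
      rw [PySem.Str.count_eq]
      have h2 : (PySem.Str.upper dna).toList = up := by simp [hup]
      have h3 : ("T" : String).toList = ['T'] := rfl
      rw [h2, h3, count_singleton]
    have hsplit := filter_count_split up
    simp only [foldl_filter, List.nil_append, hcount, PySem.Str.len_eq, Option.some.injEq]
    omega
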